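-- pv_equiv track=rewrite | github.com/lawang24/competitive-programming-archive | Codeforces/old_code/apr_8/B.py | solve
-- ===== SOURCE A (Python) =====
-- from collections import Counter
--
-- def solve(n, c, d, arr):
--
--     a = min(arr)
--
--     count = Counter(arr)
--
--     for i in range(0,n):
--         for j in range(0,n):
--             num = i*d + j*c + a
--             if count[num]:
--                 count[num]-=1
--             else:
--                 return "NO"
--
--     return "YES"
-- ===== SOURCE B (Python) =====
-- def solve(n, c, d, arr):
--     a = min(arr)
--     if n > 0 and len(arr) < n * n:
--         return "NO"  # arr cannot contain the n*n required values
--     gen = sorted(i * d + j * c + a for i in range(n) for j in range(n))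
--     vals = sorted(arr)
--     k = 0
--     for g in gen:
--         while k < len(vals) and vals[k] < g:
--             k += 1
--         if k == len(vals) or vals[k] != g:
--             return "NO"
--         k += 1
--     return "YES"
-- ===== Notes on version B (the rewrite author's own statement) =====
-- stated objective: alternative
-- what changed: A interleaves generating the n^2 values with consuming them one by one from a mutable Counter with an early exit; B sorts the generated values and the input and checks sub-multiset containment by a two-pointer merge scan over the two sorted lists, with no hash-based counting at all.
import Mathlib
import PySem

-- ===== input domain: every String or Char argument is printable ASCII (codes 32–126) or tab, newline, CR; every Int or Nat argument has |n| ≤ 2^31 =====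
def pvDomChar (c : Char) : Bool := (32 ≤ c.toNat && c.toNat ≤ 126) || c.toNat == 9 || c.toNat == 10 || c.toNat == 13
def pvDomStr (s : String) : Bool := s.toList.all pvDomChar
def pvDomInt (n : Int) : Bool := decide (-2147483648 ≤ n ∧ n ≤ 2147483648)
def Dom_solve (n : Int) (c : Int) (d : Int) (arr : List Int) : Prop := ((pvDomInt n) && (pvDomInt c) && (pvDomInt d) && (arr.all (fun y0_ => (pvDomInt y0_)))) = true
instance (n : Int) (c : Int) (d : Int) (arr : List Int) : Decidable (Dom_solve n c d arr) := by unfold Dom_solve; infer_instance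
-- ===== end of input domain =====

-- B replaces A's mutable-Counter consume loop by sorting the generated values and the
-- input and checking sub-multiset containment with a two-pointer merge scan
-- (alternative algorithm: sort-then-merge instead of hash counting; same result).

-- ===== PORT A =====
-- inner 'for j in range(0,n)': fuel counts the remaining iterations, j is the loop variable;
-- consumes values from the Counter, none = early 'return "NO"'
def solveInnerA (c d a i : Int) : Nat → Int → PySem.Dict Int Int → Option (PySem.Dict Int Int)
  | 0, _, count => some count
  | fuel + 1, j, count =>
    let num := i * d + j * c + a
    if count.getD num 0 ≠ 0 then
      solveInnerA c d a i fuel (j + 1) (count.insert num (count.getD num 0 - 1))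
    else
      none

-- outer 'for i in range(0,n)'
def solveOuterA (n c d a : Int) : Nat → Int → PySem.Dict Int Int → String
  | 0, _, _ => "YES"
  | fuel + 1, i, count =>
    match solveInnerA c d a i n.toNat 0 count with
    | some count' => solveOuterA n c d a fuel (i + 1) count'
    | none => "NO"

def solve (n : Int) (c : Int) (d : Int) (arr : List Int) : String :=
  match PySem.List.min? arr (fun x => x) with
  | none => ""  -- min([]) raises ValueError; excluded by Pre_solve
  | some a => solveOuterA n c d a n.toNat 0 (PySem.Dict.counter arr)

-- ===== PORT B =====
-- 'for g in gen' with the advancing index k ported as the remaining suffix of vals: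
-- the 'while vals[k] < g: k += 1' steps drop elements of the suffix.
def scanB : List Int → List Int → String
  | [], _ => "YES"
  | _ :: _, [] => "NO"          -- k == len(vals)
  | g :: gs, v :: vs =>
    if v < g then scanB (g :: gs) vs          -- while-step: k += 1
    else if v = g then scanB gs vs            -- matched: k += 1, next g
    else "NO"                                 -- vals[k] != g
termination_by G V => G.length + V.length

def solve_alt (n : Int) (c : Int) (d : Int) (arr : List Int) : String :=
  match PySem.List.min? arr (fun x => x) with
  | none => ""  -- min([]) raises ValueError; excluded by Pre_solve
  | some a =>
    if 0 < n ∧ (arr.length : Int) < n * n then "NO"  -- arr cannot contain the n*n required values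
    else
    let gen := PySem.List.sorted
      ((PySem.List.pyRange 0 n 1).flatMap (fun i =>
        (PySem.List.pyRange 0 n 1).map (fun j => i * d + j * c + a))) (fun x => x) false
    let vals := PySem.List.sorted arr (fun x => x) false
    scanB gen vals

-- ===== PRECONDITION & SPEC =====
-- Pre_ excludes only the empty list, on which A's min(arr) raises ValueError (B raises there too).
def Pre_solve (n : Int) (c : Int) (d : Int) (arr : List Int) : Prop := arr ≠ []
instance (n : Int) (c : Int) (d : Int) (arr : List Int) : Decidable (Pre_solve n c d arr) := by unfold Pre_solve; infer_instance
def pvWitness_solve : Int × Int × Int × List Int := (2, 1, 2, [0, 1, 2, 3])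

def Spec_solve (n : Int) (c : Int) (d : Int) (arr : List Int) (out : String) : Prop := out = solve_alt n c d arr
instance (n : Int) (c : Int) (d : Int) (arr : List Int) (out : String) : Decidable (Spec_solve n c d arr out) := by unfold Spec_solve; infer_instance

-- ===== CLAIM =====
def Claim_equal_solve : Prop := ∀ (n : Int) (c : Int) (d : Int) (arr : List Int), Dom_solve n c d arr → Pre_solve n c d arr → Spec_solve n c d arr (solve n c d arr)

-- ===== LEMMAS AND PROOFS =====

-- proof helper: A's consumption of one flat list of values
def consume : List Int → PySem.Dict Int Int → Option (PySem.Dict Int Int)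
  | [], cnt => some cnt
  | x :: xs, cnt =>
    if cnt.getD x 0 ≠ 0 then consume xs (cnt.insert x (cnt.getD x 0 - 1)) else none

theorem solveInnerA_eq_consume (c d a i : Int) (fuel : Nat) (j : Int) (cnt : PySem.Dict Int Int) :
    solveInnerA c d a i fuel j cnt =
      consume ((PySem.List.pyRange j (j + (fuel : Int)) 1).map (fun jj => i * d + jj * c + a)) cnt := by
  induction fuel generalizing j cnt with
  | zero => simp [solveInnerA, PySem.List.pyRange_one_eq_nil (le_refl j), consume]
  | succ fuel ih =>
    have hb : j + ((fuel + 1 : Nat) : Int) = (j + 1) + (fuel : Int) := by push_cast; ring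
    rw [PySem.List.pyRange_one_cons (by omega : j < j + ((fuel + 1 : Nat) : Int)), hb]
    simp only [List.map_cons, consume, solveInnerA]
    split_ifs with h
    · exact ih _ _
    · rfl

theorem consume_append (xs ys : List Int) (cnt : PySem.Dict Int Int) :
    consume (xs ++ ys) cnt = (consume xs cnt).bind (consume ys) := by
  induction xs generalizing cnt with
  | nil => rfl
  | cons x xs ih =>
    simp only [List.cons_append, consume]
    split_ifs with h
    · exact ih _
    · rfl

theorem pyRange_toNat (n : Int) :
    PySem.List.pyRange 0 ((n.toNat : Nat) : Int) 1 = PySem.List.pyRange 0 n 1 := by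
  by_cases hn : 0 ≤ n
  · rw [Int.toNat_of_nonneg hn]
  · rw [PySem.List.pyRange_one_eq_nil (by omega), PySem.List.pyRange_one_eq_nil (by omega)]

theorem solveOuterA_eq_consume (n c d a : Int) (fuel : Nat) (i : Int) (cnt : PySem.Dict Int Int) :
    solveOuterA n c d a fuel i cnt =
      match consume ((PySem.List.pyRange i (i + (fuel : Int)) 1).flatMap (fun ii =>
        (PySem.List.pyRange 0 n 1).map (fun j => ii * d + j * c + a))) cnt with
      | some _ => "YES"
      | none => "NO" := by
  induction fuel generalizing i cnt with
  | zero => simp [solveOuterA, PySem.List.pyRange_one_eq_nil (le_refl i), consume]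
  | succ fuel ih =>
    have hb : i + ((fuel + 1 : Nat) : Int) = (i + 1) + (fuel : Int) := by push_cast; ring
    rw [PySem.List.pyRange_one_cons (by omega : i < i + ((fuel + 1 : Nat) : Int)), hb]
    simp only [List.flatMap_cons, consume_append, solveOuterA, solveInnerA_eq_consume]
    rw [show (0 : Int) + (n.toNat : Int) = (n.toNat : Int) by ring, pyRange_toNat]
    cases consume ((PySem.List.pyRange 0 n 1).map (fun j => i * d + j * c + a)) cnt with
    | none => rfl
    | some cnt' =>
      simp only [Option.bind_some]
      exact ih _ _

-- the consume loop succeeds iff L is a sub-multiset of what cnt grants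
theorem consume_isSome_iff (L : List Int) (cnt : PySem.Dict Int Int)
    (hpos : ∀ k, 0 ≤ cnt.getD k 0) :
    (consume L cnt).isSome = true ↔ ∀ k ∈ L, (L.count k : Int) ≤ cnt.getD k 0 := by
  induction L generalizing cnt with
  | nil => simp [consume]
  | cons x xs ih =>
    simp only [consume]
    split_ifs with h
    · have hx : (1 : Int) ≤ cnt.getD x 0 := by
        have := hpos x; omega
      rw [ih _ (by
        intro k
        rw [PySem.Dict.getD_insert]
        split_ifs with hk
        · omega
        · exact hpos k)]
      have hcc : ∀ k : Int, ((x :: xs).count k : Int) = (xs.count k : Int) + (if k = x then 1 else 0) := by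
        intro k
        by_cases hkx : k = x
        · subst hkx; simp
        · simp [hkx, Ne.symm hkx]
      constructor
      · intro H k hk
        rw [hcc]
        by_cases hkx : k = x
        · subst hkx
          by_cases hm : k ∈ xs
          · have := H k hm
            rw [PySem.Dict.getD_insert, if_pos rfl] at this
            omega
          · rw [List.count_eq_zero_of_not_mem hm]
            simp
            omega
        · have hm : k ∈ xs := by
            rcases List.mem_cons.mp hk with hk | hk
            · exact absurd hk hkx
            · exact hk
          have := H k hm
          rw [PySem.Dict.getD_insert, if_neg hkx] at this
          simp [hkx]
          omega
      · intro H k hk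
        rw [PySem.Dict.getD_insert]
        have := H k (by simp [hk])
        rw [hcc] at this
        split_ifs with hkx
        · subst hkx
          simp at this
          omega
        · simp [hkx] at this
          omega
    · constructor
      · intro hc; cases hc
      · intro H
        have := H x (by simp)
        simp at this
        have h0 := hpos x
        omega

-- B's merge scan on a sorted pool decides sublist (greedy matching; only the pool needs order)
theorem scanB_yes_iff (G V : List Int) (hV : V.Pairwise (· ≤ ·)) :
    scanB G V = "YES" ↔ List.Sublist G V := by
  induction V generalizing G with
  | nil =>
    cases G with
    | nil => simp [scanB]
    | cons g gs => simp [scanB]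
  | cons v vs ih =>
    cases G with
    | nil => simp [scanB]
    | cons g gs =>
      have hV' : vs.Pairwise (· ≤ ·) := hV.tail
      simp only [scanB]
      split_ifs with h1 h2
      · -- v < g: any embedding of g::gs must avoid v
        rw [ih _ hV']
        constructor
        · intro hs; exact hs.cons v
        · intro hs
          cases hs with
          | cons _ h => exact h
          | cons₂ _ h => omega
      · -- v = g
        subst h2
        rw [ih _ hV']
        exact List.cons_sublist_cons.symm
      · -- g < v: g cannot occur in v::vs
        constructor
        · intro hc; exact absurd hc (by decide)
        · intro hs
          have hg : g ∈ v :: vs := hs.subset (by simp)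
          rcases List.mem_cons.mp hg with h | h
          · omega
          · have := (List.pairwise_cons.mp hV).1 g h
            omega

-- B's scan returns only "YES" or "NO"
theorem scanB_eq_yes_or_no (G V : List Int) : scanB G V = "YES" ∨ scanB G V = "NO" := by
  induction V generalizing G with
  | nil => cases G <;> simp [scanB]
  | cons v vs ih =>
    cases G with
    | nil => simp [scanB]
    | cons g gs =>
      simp only [scanB]
      split_ifs with h1 h2
      · exact ih _
      · exact ih _
      · right; rfl

theorem length_flatMap_range (n c d a : Int) :
    ((PySem.List.pyRange 0 n 1).flatMap (fun i =>
      (PySem.List.pyRange 0 n 1).map (fun j => i * d + j * c + a))).length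
      = n.toNat * n.toNat := by
  rw [List.length_flatMap]
  simp [PySem.List.length_pyRange_one, List.map_const', List.sum_replicate, smul_eq_mul, mul_comm]

-- ===== VERDICT (by name: the statement is the Claim_ definition above) =====
theorem solve_spec : Claim_equal_solve := by
  intro n c d arr _ hpre
  unfold Spec_solve solve solve_alt
  cases hmin : PySem.List.min? arr (fun x => x) with
  | none => rfl
  | some a =>
    simp only
    set L := (PySem.List.pyRange 0 n 1).flatMap (fun i =>
      (PySem.List.pyRange 0 n 1).map (fun j => i * d + j * c + a)) with hL
    rw [solveOuterA_eq_consume]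
    rw [show (0 : Int) + (n.toNat : Int) = (n.toNat : Int) by ring, pyRange_toNat]
    -- A's side: consume succeeds iff L is a sub-multiset of arr
    have hiff := consume_isSome_iff L (PySem.Dict.counter arr)
      (by intro k; rw [PySem.Dict.getD_counter]; positivity)
    simp only [PySem.Dict.getD_counter] at hiff
    -- B's side: the merge scan succeeds iff sorted L is a sublist of sorted arr,
    -- which (both sorted) is sub-multiset containment of L in arr
    have hVp : (PySem.List.sorted arr (fun x => x) false).Pairwise (· ≤ ·) :=
      PySem.List.sorted_pairwise arr (fun x => x)
    have hGp : (PySem.List.sorted L (fun x => x) false).Pairwise (· ≤ ·) :=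
      PySem.List.sorted_pairwise L (fun x => x)
    have hscan :
        scanB (PySem.List.sorted L (fun x => x) false) (PySem.List.sorted arr (fun x => x) false) = "YES"
          ↔ List.Subperm L arr := by
      rw [scanB_yes_iff _ _ hVp]
      constructor
      · intro hs
        have := hs.subperm
        rwa [(PySem.List.sorted_perm L (fun x => x) false).subperm_right,
             (PySem.List.sorted_perm arr (fun x => x) false).subperm_left] at this
      · intro hs
        refine List.sublist_of_subperm_of_pairwise ?_ hGp hVp
        rwa [(PySem.List.sorted_perm L (fun x => x) false).subperm_right,
             (PySem.List.sorted_perm arr (fun x => x) false).subperm_left]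
    -- bridge the two characterisations through counts
    have hcount : List.Subperm L arr ↔ ∀ k ∈ L, (L.count k : Int) ≤ (arr.count k : Int) := by
      rw [List.subperm_ext_iff]
      constructor
      · intro H k hk; exact_mod_cast H k hk
      · intro H k hk; exact_mod_cast H k hk
    by_cases hsub : List.Subperm L arr
    · -- the generated multiset fits: the cardinality guard cannot fire
      have hlen : L.length ≤ arr.length := hsub.length_le
      have hcard : L.length = n.toNat * n.toNat := length_flatMap_range n c d a
      have hng : ¬ (0 < n ∧ (arr.length : Int) < n * n) := by
        rintro ⟨hn, hbig⟩
        have h1 : (n.toNat : Int) = n := Int.toNat_of_nonneg (le_of_lt hn)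
        have h2 : ((n.toNat * n.toNat : Nat) : Int) = n * n := by push_cast [h1]; try ring
        omega
      rw [if_neg hng]
      have h1 : (consume L (PySem.Dict.counter arr)).isSome = true := hiff.mpr (hcount.mp hsub)
      rcases Option.isSome_iff_exists.mp h1 with ⟨cnt', hc⟩
      rw [hc, hscan.mpr hsub]
    · have h2 : consume L (PySem.Dict.counter arr) = none := by
        cases hh : consume L (PySem.Dict.counter arr) with
        | none => rfl
        | some _ =>
          exact absurd (hcount.mpr (hiff.mp (by rw [hh]; rfl))) hsub
      rw [h2]
      split_ifs with hg
      · rfl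
      · rcases scanB_eq_yes_or_no (PySem.List.sorted L (fun x => x) false)
          (PySem.List.sorted arr (fun x => x) false) with hy | hn
        · exact absurd (hscan.mp hy) hsub
        · exact hn.symm
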